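-- pv_equiv track=rewrite | github.com/LuizGusQueiroz/Automacoes | KMF/Contas a Pagar/padroes/p03.py | padrao_03
-- ===== SOURCE A (Python) =====
-- from typing import List
--
-- def padrao_03(rows: List[str]) -> str:
--     """
--     Encontra o nome e o cpf do funionário na lista de linhas da página pdf e retorna um nome de arquivo formatado.
--     Args:
--         rows (List[str]): Lista de linhas da página do pdf.
--
--     Returns:
--         str: O nome formatado para o arquivo. No modelo '{nome}-{cpf}.pdf'.
--     """
--     beneficiario = rows[1]
--     for row in rows:
--         if '(=)' in row:
--             num = row[row.find('Parcela')-7:row.find('Parcela')]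
--         if 'R$' in row:
--             valor = row.split()[1]
--             break
--     file_name = f'FOLK - {valor} - BOLETO - num{num} - {beneficiario}.pdf'
--     return file_name
-- ===== SOURCE B (Python) =====
-- from typing import List
--
-- def padrao_03(rows: List[str]) -> str:
--     # Different decomposition: locate the first 'R$' row by index, then search
--     # backwards from it (inclusive) for the last '(=)' row, instead of one
--     # fused stateful loop.
--     i = next(j for j, row in enumerate(rows) if 'R$' in row)
--     valor = rows[i].split()[1]
--     num_row = next(r for r in reversed(rows[:i + 1]) if '(=)' in r)
--     p = num_row.find('Parcela')
--     num = num_row[p - 7:p]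
--     return f'FOLK - {valor} - BOLETO - num{num} - {rows[1]}.pdf'
-- ===== Notes on version B (the rewrite author's own statement) =====
-- stated objective: alternative
-- what changed: A's single fused loop carrying num/valor state with a break is replaced by index-directed lookups: find the index of the first 'R$' row, take valor from it, and scan the prefix up to it backwards for the last '(=)' row; Pre_ excludes exactly the inputs where A raises (fewer than 2 rows NameError/IndexError, no 'R$' row, first 'R$' row with <2 words, no '(=)' row at or before it).
import Mathlib
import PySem

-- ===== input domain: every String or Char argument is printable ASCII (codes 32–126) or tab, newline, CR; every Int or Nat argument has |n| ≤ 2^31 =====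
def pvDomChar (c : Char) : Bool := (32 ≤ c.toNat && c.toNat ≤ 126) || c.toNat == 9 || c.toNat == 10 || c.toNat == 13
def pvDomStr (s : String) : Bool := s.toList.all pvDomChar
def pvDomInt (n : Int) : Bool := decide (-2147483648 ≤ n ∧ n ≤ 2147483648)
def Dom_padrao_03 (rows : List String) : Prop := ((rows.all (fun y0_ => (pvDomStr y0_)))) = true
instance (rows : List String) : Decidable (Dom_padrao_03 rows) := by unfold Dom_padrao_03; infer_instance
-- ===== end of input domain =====

-- B replaces A's single fused stateful loop by index-directed lookups: first-'R$' index, then a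
-- backward scan of the prefix for '(=)' (objective: alternative decomposition; no speed claim).

-- ===== PORT A =====
-- shared f-string formatting 'FOLK - {valor} - BOLETO - num{num} - {beneficiario}.pdf'
def pvFmt (valor num ben : String) : String :=
  PySem.Str.join "" ["FOLK - ", valor, " - BOLETO - num", num, " - ", ben, ".pdf"]

-- the '(=)' branch's value: row[row.find('Parcela')-7 : row.find('Parcela')]
def pvNumOf (row : String) : String :=
  PySem.Str.slice row (some (PySem.Str.find row "Parcela" - 7)) (some (PySem.Str.find row "Parcela"))

-- A's for-loop: state num : Option String (none = name not yet bound); result (valor?, num?)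
-- where valor? = none means the loop ended without break (NameError) or split()[1] raised.
def padraoLoopA (rows : List String) (num : Option String) : Option String × Option String :=
  match rows with
  | [] => (none, num)
  | r :: rest =>
    let num' := if PySem.Str.isIn "(=)" r then some (pvNumOf r) else num
    if PySem.Str.isIn "R$" r then ((PySem.Str.split₀ r)[1]?, num')
    else padraoLoopA rest num'

def padrao_03 (rows : List String) : String :=
  match rows[1]? with
  | none => ""              -- IndexError: outside Pre_
  | some beneficiario =>
    match padraoLoopA rows none with
    | (some valor, some num) => pvFmt valor num beneficiario
    | _ => ""               -- NameError / IndexError: outside Pre_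

-- ===== PORT B =====
def padrao_03_alt (rows : List String) : String :=
  match rows[rows.findIdx (fun r => PySem.Str.isIn "R$" r)]? with
  | none => ""              -- StopIteration: outside Pre_
  | some rrow =>
    match (PySem.Str.split₀ rrow)[1]? with
    | none => ""            -- IndexError: outside Pre_
    | some valor =>
      match ((rows.take (rows.findIdx (fun r => PySem.Str.isIn "R$" r) + 1)).reverse).find?
          (fun r => PySem.Str.isIn "(=)" r) with
      | none => ""          -- StopIteration: outside Pre_
      | some nrow =>
        match rows[1]? with
        | none => ""        -- IndexError: outside Pre_
        | some ben => pvFmt valor (pvNumOf nrow) ben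

-- ===== PRECONDITION & SPEC =====
-- Pre_ = exactly the inputs where A returns: at least 2 rows, some row contains 'R$',
-- the first such row splits into ≥ 2 words, and some row up to it (inclusive) contains '(=)'.
def Pre_padrao_03 (rows : List String) : Prop :=
  2 ≤ rows.length ∧
  (let i := rows.findIdx (fun r => PySem.Str.isIn "R$" r)
   i < rows.length ∧
   2 ≤ (PySem.Str.split₀ (rows.getD i "")).length ∧
   (rows.take (i + 1)).any (fun r => PySem.Str.isIn "(=)" r) = true)
instance (rows : List String) : Decidable (Pre_padrao_03 rows) := by unfold Pre_padrao_03; infer_instance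

def pvWitness_padrao_03 : List String :=
  ["cabecalho", "FULANO DA SILVA", "(=) Total Parcela 003", "valor R$ 1.234,56"]

def Spec_padrao_03 (rows : List String) (out : String) : Prop := out = padrao_03_alt rows
instance (rows : List String) (out : String) : Decidable (Spec_padrao_03 rows out) := by unfold Spec_padrao_03; infer_instance

-- ===== CLAIM (what is proved, stated in full; the proofs are below) =====
def Claim_equal_padrao_03 : Prop := ∀ (rows : List String), Dom_padrao_03 rows → Pre_padrao_03 rows → Spec_padrao_03 rows (padrao_03 rows)

-- ===== LEMMAS AND PROOFS =====

-- characterisation of A's loop in B's terms (first-'R$' lookup + backward '(=)' scan of the prefix)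
theorem padraoLoopA_eq (rows : List String) (num0 : Option String) :
    padraoLoopA rows num0 =
      (match rows[rows.findIdx (fun r => PySem.Str.isIn "R$" r)]? with
        | some r => (PySem.Str.split₀ r)[1]?
        | none => none,
       match ((rows.take (rows.findIdx (fun r => PySem.Str.isIn "R$" r) + 1)).reverse).find?
                (fun r => PySem.Str.isIn "(=)" r) with
        | some r => some (pvNumOf r)
        | none => num0) := by
  induction rows generalizing num0 with
  | nil => rfl
  | cons r rest ih =>
    by_cases hR : PySem.Str.isIn "R$" r = true
    · simp only [padraoLoopA, List.findIdx_cons, hR, cond_true]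
      by_cases hQ : PySem.Str.isIn "(=)" r = true <;> simp_all [List.find?]
    · simp only [padraoLoopA, List.findIdx_cons, hR, cond_false, ih]
      have htake : (r :: rest).take (rest.findIdx (fun r => PySem.Str.isIn "R$" r) + 1 + 1)
          = r :: rest.take (rest.findIdx (fun r => PySem.Str.isIn "R$" r) + 1) := rfl
      rw [htake, List.reverse_cons, List.find?_append]
      cases hf : ((rest.take (rest.findIdx (fun r => PySem.Str.isIn "R$" r) + 1)).reverse).find?
          (fun r => PySem.Str.isIn "(=)" r) <;>
        by_cases hQ : PySem.Str.isIn "(=)" r = true <;>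
        simp_all [List.find?]

-- ===== VERDICT (by name: the statement is the Claim_ definition above) =====
theorem padrao_03_spec : Claim_equal_padrao_03 := by
  intro rows _ hpre
  obtain ⟨hlen, hi, hsplit, hany⟩ := hpre
  unfold Spec_padrao_03 padrao_03 padrao_03_alt
  rw [padraoLoopA_eq]
  obtain ⟨rrow, hrrow⟩ : ∃ r,
      rows[rows.findIdx (fun r => PySem.Str.isIn "R$" r)]? = some r :=
    ⟨_, List.getElem?_eq_getElem hi⟩
  obtain ⟨ben, hben⟩ : ∃ b, rows[1]? = some b :=
    ⟨_, List.getElem?_eq_getElem (by omega)⟩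
  have hgetD : rows.getD (rows.findIdx (fun r => PySem.Str.isIn "R$" r)) "" = rrow := by
    rw [List.getD_eq_getElem?_getD, hrrow]; rfl
  rw [hgetD] at hsplit
  obtain ⟨valor, hvalor⟩ : ∃ v, (PySem.Str.split₀ rrow)[1]? = some v :=
    ⟨_, List.getElem?_eq_getElem (by omega)⟩
  obtain ⟨nrow, hnrow⟩ : ∃ n,
      ((rows.take (rows.findIdx (fun r => PySem.Str.isIn "R$" r) + 1)).reverse).find?
        (fun r => PySem.Str.isIn "(=)" r) = some n := by
    rw [← Option.isSome_iff_exists, List.find?_isSome]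
    rw [List.any_eq_true] at hany
    obtain ⟨x, hx, hpx⟩ := hany
    exact ⟨x, List.mem_reverse.mpr hx, hpx⟩
  simp only [hrrow, hben, hvalor, hnrow]
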